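-- pv_equiv track=rewrite | github.com/GabrielAngelAlvaTaibo/alvareztaibo_gabriel_pp__ | Package_Calculos/Especificas.py | obtener_cantidad_clientes_no_pequenos_ni_grandes
-- ===== SOURCE A (Python) =====
-- def obtener_cantidad_clientes_no_pequenos_ni_grandes(matriz):
--     """Obtiene la cantidad de clientes que no enviaron ni paquetes pequeños ni grandes.
--
--     Args:
--         matriz (_type_): obtiene la matriz a medir
--
--     Returns:
--         _type_: Retorna la cantidad de clientes que no enviaron ni paquetes pequeños ni grandes
--     """
--     cantidad = 0
--     for i in range(0, len(matriz)):
--         sin_envio_pequeno = False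
--         sin_envio_grande = False
--         for j in range(1, len(matriz[i])):
--             match j:
--                 case 1:
--                     if matriz[i][j] == 0:
--                         sin_envio_pequeno = True
--                 case 2:
--                     continue
--                 case 3:
--                     if matriz[i][j] == 0:
--                         sin_envio_grande = True
--         if sin_envio_grande == True and sin_envio_pequeno == True:
--             cantidad += 1
--
--     return cantidad
-- ===== SOURCE B (Python) =====
-- def obtener_cantidad_clientes_no_pequenos_ni_grandes(matriz):
--     """Cuenta clientes sin paquetes pequenos ni grandes: filas cuyas columnas 1 y 3 son 0.
--
--     Same value as A: a row counts iff it has at least 4 elements and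
--     row[1] == 0 and row[3] == 0 (shorter rows never set the 'grande' flag in A).
--     """
--     return sum(1 for fila in matriz
--                if len(fila) > 3 and fila[1] == 0 and fila[3] == 0)
-- ===== Notes on version B (the rewrite author's own statement) =====
-- stated objective: simpler
-- what changed: Replaced the nested index loop with a per-row match/flag state machine by a single generator-expression sum testing each row directly (length > 3 and columns 1 and 3 equal 0), with no inner loop and no flags.
import Mathlib
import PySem

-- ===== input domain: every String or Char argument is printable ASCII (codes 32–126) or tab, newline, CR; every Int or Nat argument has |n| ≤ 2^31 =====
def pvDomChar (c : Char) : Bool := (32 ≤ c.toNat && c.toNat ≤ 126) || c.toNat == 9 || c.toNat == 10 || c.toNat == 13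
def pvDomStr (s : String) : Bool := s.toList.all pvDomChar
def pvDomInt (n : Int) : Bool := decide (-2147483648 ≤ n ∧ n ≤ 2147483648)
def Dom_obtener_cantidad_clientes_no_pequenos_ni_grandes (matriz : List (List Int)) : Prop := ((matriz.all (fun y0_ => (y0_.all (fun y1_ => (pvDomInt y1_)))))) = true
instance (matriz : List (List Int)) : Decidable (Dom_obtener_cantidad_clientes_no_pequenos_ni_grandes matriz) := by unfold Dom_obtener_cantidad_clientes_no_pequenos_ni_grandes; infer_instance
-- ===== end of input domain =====

-- B replaces A's nested index loop + match/flag state machine by one direct test per row (objective: simpler).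

-- ===== PORT A =====
-- inner loop body: 'match j: case 1 … case 2: continue … case 3 …' on the flag pair
def stepA (fila : List Int) (st : Bool × Bool) (j : Int) : Bool × Bool :=
  if j = 1 then (if PySem.List.pyGetD fila j 0 = 0 then (true, st.2) else st)
  else if j = 2 then st
  else if j = 3 then (if PySem.List.pyGetD fila j 0 = 0 then (st.1, true) else st)
  else st

-- 'for j in range(1, len(matriz[i]))' accumulating (sin_envio_pequeno, sin_envio_grande)
def innerA (fila : List Int) : Bool × Bool :=
  (PySem.List.pyRange 1 (fila.length : Int) 1).foldl (stepA fila) (false, false)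

-- outer-loop body for row matriz[i]: run the inner loop, then the final if
def rowA (cantidad : Int) (fila : List Int) : Int :=
  let st := innerA fila
  if st.2 = true ∧ st.1 = true then cantidad + 1 else cantidad

def obtener_cantidad_clientes_no_pequenos_ni_grandes (matriz : List (List Int)) : Int :=
  (PySem.List.pyRange 0 (matriz.length : Int) 1).foldl
    (fun cantidad i => rowA cantidad (PySem.List.pyGetD matriz i []))
    0

-- ===== PORT B =====
-- the generator's filter condition
def altPred (fila : List Int) : Bool :=
  decide ((fila.length : Int) > 3) && (PySem.List.pyGetD fila 1 0 == 0) && (PySem.List.pyGetD fila 3 0 == 0)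

-- sum(1 for fila in matriz if …) = count of rows passing the filter
def obtener_cantidad_clientes_no_pequenos_ni_grandes_alt (matriz : List (List Int)) : Int :=
  ((matriz.countP altPred : Nat) : Int)

-- ===== PRECONDITION & SPEC =====
def Spec_obtener_cantidad_clientes_no_pequenos_ni_grandes (matriz : List (List Int)) (out : Int) : Prop := out = obtener_cantidad_clientes_no_pequenos_ni_grandes_alt matriz
instance (matriz : List (List Int)) (out : Int) : Decidable (Spec_obtener_cantidad_clientes_no_pequenos_ni_grandes matriz out) := by unfold Spec_obtener_cantidad_clientes_no_pequenos_ni_grandes; infer_instance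

-- ===== CLAIM (what is proved, stated in full; the proofs are below) =====
def Claim_equal_obtener_cantidad_clientes_no_pequenos_ni_grandes : Prop := ∀ (matriz : List (List Int)), Dom_obtener_cantidad_clientes_no_pequenos_ni_grandes matriz → Spec_obtener_cantidad_clientes_no_pequenos_ni_grandes matriz (obtener_cantidad_clientes_no_pequenos_ni_grandes matriz)

-- ===== LEMMAS AND PROOFS =====

-- j ≥ 4 hits no match case: folding over range(4, 4+n) is a no-op
lemma foldl_stepA_noop (fila : List Int) (st : Bool × Bool) (n : Nat) :
    (PySem.List.pyRange 4 (4 + (n : Int)) 1).foldl (stepA fila) st = st := by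
  induction n generalizing st with
  | zero => simp [PySem.List.pyRange_one_eq_nil]
  | succ k ih =>
      rw [show (4 + ((k + 1 : Nat) : Int)) = (4 + (k : Int)) + 1 by push_cast; ring,
          PySem.List.pyRange_one_succ_right (by omega), List.foldl_append]
      rw [ih]
      simp only [List.foldl]
      unfold stepA
      rw [if_neg (by omega), if_neg (by omega), if_neg (by omega)]

-- the row is counted iff it has ≥ 4 entries and entries 1 and 3 are 0
lemma innerA_eq_altPred (fila : List Int) :
    ((innerA fila).2 && (innerA fila).1) = altPred fila := by
  match fila with
  | [] => decide
  | [a] =>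
      simp [innerA, altPred, PySem.List.pyRange_one_eq_nil]
  | [a, b] =>
      simp only [innerA, altPred]
      rw [show ((([a,b] : List Int).length : Int)) = 2 by simp,
          show PySem.List.pyRange 1 2 1 = [1] from by decide]
      simp [stepA, PySem.List.pyGetD]
      split_ifs <;> simp
  | [a, b, c] =>
      simp only [innerA, altPred]
      rw [show ((([a,b,c] : List Int).length : Int)) = 3 by simp,
          show PySem.List.pyRange 1 3 1 = [1, 2] from by decide]
      simp [stepA, PySem.List.pyGetD]
      split_ifs <;> simp
  | a :: b :: c :: d :: rest =>
      simp only [innerA, altPred]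
      have hlen : ((a :: b :: c :: d :: rest).length : Int) = 4 + (rest.length : Int) := by
        simp; ring
      rw [hlen, PySem.List.pyRange_one_append 1 4 (4 + (rest.length : Int)) (by omega) (by omega),
          List.foldl_append,
          show PySem.List.pyRange 1 4 1 = [1, 2, 3] from by decide]
      rw [foldl_stepA_noop]
      simp only [List.foldl]
      simp [stepA, PySem.List.pyGetD, PySem.List.pyIdx?, PySem.List.pyGet?]
      split_ifs <;> simp_all <;> omega

-- A's outer loop, rewritten over the list, equals the count
lemma foldl_count (l : List (List Int)) (acc : Int) :
    l.foldl rowA acc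
      = acc + ((l.countP altPred : Nat) : Int) := by
  induction l generalizing acc with
  | nil => simp
  | cons x xs ih =>
      simp only [List.foldl, List.countP_cons, rowA]
      rw [ih]
      have h := innerA_eq_altPred x
      by_cases hx : altPred x = true
      · rw [hx] at h
        have h1 : (innerA x).2 = true ∧ (innerA x).1 = true := by
          constructor <;> [exact (Bool.and_eq_true _ _ ▸ h).1; exact (Bool.and_eq_true _ _ ▸ h).2]
        simp only [if_pos h1, hx]
        push_cast; ring
      · rw [Bool.not_eq_true] at hx
        rw [hx] at h
        have h1 : ¬((innerA x).2 = true ∧ (innerA x).1 = true) := by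
          intro ⟨h2, h3⟩; rw [h2, h3] at h; simp at h
        simp only [if_neg h1, hx]
        simp

-- ===== VERDICT (by name: the statement is the Claim_ definition above) =====
theorem obtener_cantidad_clientes_no_pequenos_ni_grandes_spec : Claim_equal_obtener_cantidad_clientes_no_pequenos_ni_grandes := by
  intro matriz _
  unfold Spec_obtener_cantidad_clientes_no_pequenos_ni_grandes
  unfold obtener_cantidad_clientes_no_pequenos_ni_grandes obtener_cantidad_clientes_no_pequenos_ni_grandes_alt
  rw [PySem.List.foldl_pyRange_zero_pyGetD' matriz [] rowA 0]
  rw [foldl_count]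
  simp
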